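-- pv_equiv track=rewrite | github.com/volcengine/verl | atropos/environments/intern_bootcamp/internbootcamp_lib/internbootcamp/bootcamp/dhugestrings/dhugestrings.py | mset
-- ===== SOURCE A (Python) =====
-- def mset(s):
--     substr_set = set()
--     for k in range(10):
--         for num in range(2**k):
--             bin_str = bin(num)[2:].zfill(k)
--             if bin_str in s:
--                 substr_set.add(bin_str)
--     return substr_set
-- ===== SOURCE B (Python) =====
-- def mset(s):
--     result = set()
--     level = [""]
--     for _ in range(9):
--         nxt = []
--         for p in level:
--             for c in "01":
--                 q = p + c
--                 if q in s:
--                     nxt.append(q)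
--         result.update(nxt)
--         level = nxt
--     return result
-- ===== Notes on version B (the rewrite author's own statement) =====
-- stated objective: faster
-- what changed: A tests all 2^0+...+2^9 = 1023 zero-padded binary strings against s; B grows the found substrings level by level, extending only substrings already found by one bit (a pruned trie walk), so only candidates whose prefix occurs in s are ever tested.
import Mathlib
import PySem

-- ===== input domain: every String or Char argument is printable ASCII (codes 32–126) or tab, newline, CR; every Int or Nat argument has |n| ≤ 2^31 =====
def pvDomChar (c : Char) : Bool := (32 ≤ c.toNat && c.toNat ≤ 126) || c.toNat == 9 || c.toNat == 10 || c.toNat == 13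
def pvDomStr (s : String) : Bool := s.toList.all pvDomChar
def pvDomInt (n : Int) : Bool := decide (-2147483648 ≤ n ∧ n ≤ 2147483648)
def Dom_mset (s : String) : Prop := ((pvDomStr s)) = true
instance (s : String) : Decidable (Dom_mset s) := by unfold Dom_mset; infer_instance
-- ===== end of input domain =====

-- B replaces A's exhaustive enumeration of all 2^0+…+2^9 binary strings by a level-by-level
-- extension of the binary substrings already found (a pruned trie walk); return value only.

-- ===== PORT A =====
-- bin(num)[2:].zfill(k)
def binStrA (k num : Int) : List Char :=
  PySem.Chars.zfill (PySem.List.slice (PySem.Int.toBinChars0b num) (some 2) none) k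

-- body of A's inner loop: 'if bin_str in s: substr_set.add(bin_str)'
def aInner (sl : List Char) (k : Int) (st : PySem.Set (List Char)) (num : Int) :
    PySem.Set (List Char) :=
  let binStr := binStrA k num
  if PySem.Chars.isIn binStr sl then PySem.Set.add st binStr else st

-- range(2**k): k comes from range(10), so k ≥ 0 and 2**k is (2 : Int) ^ k.toNat
def mset (s : String) : List String :=
  let substrSet :=
    (PySem.List.pyRange 0 10 1).foldl
      (fun st k => (PySem.List.pyRange 0 ((2 : Int) ^ k.toNat) 1).foldl (aInner s.toList k) st)
      (PySem.Set.empty)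
  substrSet.map String.ofList

-- ===== PORT B =====
-- one iteration of B's outer loop: build nxt from level (st.2), then result.update(nxt)
def bStep (sl : List Char) (st : PySem.Set (List Char) × List (List Char)) (_ : Int) :
    PySem.Set (List Char) × List (List Char) :=
  let nxt := st.2.foldl
    (fun nxt p => ("01".toList).foldl
      (fun nxt c => if PySem.Chars.isIn (p ++ [c]) sl then nxt ++ [p ++ [c]] else nxt) nxt)
    []
  (PySem.Set.update st.1 nxt, nxt)

def mset_alt (s : String) : List String :=
  let res := (PySem.List.pyRange 0 9 1).foldl (bStep s.toList) (PySem.Set.empty, [[]])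
  res.1.map String.ofList

-- ===== PRECONDITION & SPEC =====
def Spec_mset (s : String) (out : List String) : Prop := out = mset_alt s
instance (s : String) (out : List String) : Decidable (Spec_mset s out) := by unfold Spec_mset; infer_instance

-- ===== CLAIM (what is proved, stated in full; the proofs are below) =====
def Claim_equal_mset : Prop := ∀ (s : String), Dom_mset s → Spec_mset s (mset s)

-- ===== LEMMAS AND PROOFS =====

-- all binary strings of length k, in numeric (lexicographic) order
def allBin : Nat → List (List Char)
  | 0 => [[]]
  | k+1 => (allBin k).flatMap (fun p => [p ++ ['0'], p ++ ['1']])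

-- A's candidate list at level k is exactly allBin k (numeric order); k = 0 gives ["0"]
lemma cand0 : ((PySem.List.pyRange 0 ((2:Int) ^ ((0:Int)).toNat) 1).map (binStrA 0)) = [['0']] := by decide
set_option maxRecDepth 100000 in
lemma cand_eq1 : ((PySem.List.pyRange 0 ((2:Int) ^ ((1:Int)).toNat) 1).map (binStrA 1)) = allBin 1 := by decide
set_option maxRecDepth 100000 in
lemma cand_eq2 : ((PySem.List.pyRange 0 ((2:Int) ^ ((2:Int)).toNat) 1).map (binStrA 2)) = allBin 2 := by decide
set_option maxRecDepth 100000 in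
lemma cand_eq3 : ((PySem.List.pyRange 0 ((2:Int) ^ ((3:Int)).toNat) 1).map (binStrA 3)) = allBin 3 := by decide
set_option maxRecDepth 100000 in
lemma cand_eq4 : ((PySem.List.pyRange 0 ((2:Int) ^ ((4:Int)).toNat) 1).map (binStrA 4)) = allBin 4 := by decide
set_option maxRecDepth 100000 in
lemma cand_eq5 : ((PySem.List.pyRange 0 ((2:Int) ^ ((5:Int)).toNat) 1).map (binStrA 5)) = allBin 5 := by decide
set_option maxRecDepth 100000 in
lemma cand_eq6 : ((PySem.List.pyRange 0 ((2:Int) ^ ((6:Int)).toNat) 1).map (binStrA 6)) = allBin 6 := by decide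
set_option maxRecDepth 100000 in
lemma cand_eq7 : ((PySem.List.pyRange 0 ((2:Int) ^ ((7:Int)).toNat) 1).map (binStrA 7)) = allBin 7 := by decide
set_option maxRecDepth 100000 in
lemma cand_eq8 : ((PySem.List.pyRange 0 ((2:Int) ^ ((8:Int)).toNat) 1).map (binStrA 8)) = allBin 8 := by decide
set_option maxRecDepth 100000 in
lemma cand_eq9 : ((PySem.List.pyRange 0 ((2:Int) ^ ((9:Int)).toNat) 1).map (binStrA 9)) = allBin 9 := by decide

lemma add_add_self (st : PySem.Set (List Char)) (x : List Char) :
    PySem.Set.add (PySem.Set.add st x) x = PySem.Set.add st x := by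
  simp [PySem.Set.add, PySem.Set.contains]
  split_ifs with h <;> simp [h]

lemma foldl_if_add (sl : List Char) (l : List (List Char)) (st : PySem.Set (List Char)) :
    l.foldl (fun st q => if PySem.Chars.isIn q sl then PySem.Set.add st q else st) st
      = PySem.Set.update st (l.filter (fun q => PySem.Chars.isIn q sl)) := by
  induction l generalizing st with
  | nil => rfl
  | cons a t ih =>
      simp only [List.foldl_cons, List.filter_cons]
      split_ifs with h <;> simp [ih, PySem.Set.update]

lemma aInner_fold (sl : List Char) (k : Int) (st : PySem.Set (List Char)) :
    (PySem.List.pyRange 0 ((2:Int) ^ k.toNat) 1).foldl (aInner sl k) st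
      = PySem.Set.update st
          (((PySem.List.pyRange 0 ((2:Int) ^ k.toNat) 1).map (binStrA k)).filter
            (fun q => PySem.Chars.isIn q sl)) := by
  have h : ∀ (st : PySem.Set (List Char)) (l : List Int), List.foldl (aInner sl k) st l
      = List.foldl (fun st q => if PySem.Chars.isIn q sl then PySem.Set.add st q else st) st
          (l.map (binStrA k)) := by
    intro st l; rw [List.foldl_map]; rfl
  rw [h, foldl_if_add]

lemma isIn_append_false (p : List Char) (c : Char) (sl : List Char)
    (h : PySem.Chars.isIn p sl = false) : PySem.Chars.isIn (p ++ [c]) sl = false := by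
  rw [PySem.Chars.isIn_eq_false_iff] at *
  intro hin; exact h (((List.prefix_append p [c]).isInfix).trans hin)

-- B's inner two loops append the surviving extensions of each p in level
lemma b_inner (sl : List Char) (l acc : List (List Char)) :
    l.foldl
      (fun nxt p => ("01".toList).foldl
        (fun nxt c => if PySem.Chars.isIn (p ++ [c]) sl then nxt ++ [p ++ [c]] else nxt) nxt) acc
    = acc ++ l.flatMap (fun p => [p ++ ['0'], p ++ ['1']].filter (fun q => PySem.Chars.isIn q sl)) := by
  induction l generalizing acc with
  | nil => simp
  | cons a t ih =>
      show List.foldl _ (List.foldl _ acc ['0', '1']) t = _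
      simp only [List.foldl_cons, List.foldl_nil, ih, List.flatMap_cons, List.filter_cons,
        List.filter_nil]
      split_ifs <;> simp

-- extending the surviving level-k strings gives exactly the surviving level-(k+1) strings
lemma level_step (sl : List Char) (k : Nat) :
    ((allBin k).filter (fun q => PySem.Chars.isIn q sl)).flatMap
        (fun p => [p ++ ['0'], p ++ ['1']].filter (fun q => PySem.Chars.isIn q sl))
      = (allBin (k+1)).filter (fun q => PySem.Chars.isIn q sl) := by
  rw [show allBin (k+1) = (allBin k).flatMap (fun p => [p ++ ['0'], p ++ ['1']]) from rfl,
    List.filter_flatMap]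
  induction allBin k with
  | nil => rfl
  | cons a t ih =>
      rw [List.filter_cons]
      by_cases h : PySem.Chars.isIn a sl = true
      · rw [if_pos h, List.flatMap_cons, List.flatMap_cons, ih]
      · have hf := eq_false_of_ne_true h
        rw [hf]
        simp only [Bool.false_eq_true, if_false, List.flatMap_cons, ih]
        rw [show ([a ++ ['0'], a ++ ['1']].filter (fun q => PySem.Chars.isIn q sl)) = [] by
          simp [isIn_append_false a '0' sl hf, isIn_append_false a '1' sl hf]]
        rw [List.nil_append]

-- the concatenation of the surviving levels k+1 … k+n
def layers (sl : List Char) (k n : Nat) : List (List Char) :=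
  match n with
  | 0 => []
  | n+1 => (allBin (k+1)).filter (fun q => PySem.Chars.isIn q sl) ++ layers sl (k+1) n

lemma update_append (st : PySem.Set (List Char)) (a b : List (List Char)) :
    PySem.Set.update st (a ++ b) = PySem.Set.update (PySem.Set.update st a) b :=
  List.foldl_append

lemma b_loop (sl : List Char) (l : List Int) : ∀ (k : Nat) (st : PySem.Set (List Char)),
    l.foldl (bStep sl) (st, (allBin k).filter (fun q => PySem.Chars.isIn q sl))
      = (PySem.Set.update st (layers sl k l.length),
         (allBin (k + l.length)).filter (fun q => PySem.Chars.isIn q sl)) := by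
  induction l with
  | nil => intro k st; simp [layers, PySem.Set.update]
  | cons a t ih =>
      intro k st
      show t.foldl (bStep sl) (bStep sl (st, _) a) = _
      rw [show bStep sl (st, (allBin k).filter (fun q => PySem.Chars.isIn q sl)) a
            = (PySem.Set.update st ((allBin (k+1)).filter (fun q => PySem.Chars.isIn q sl)),
               (allBin (k+1)).filter (fun q => PySem.Chars.isIn q sl)) by
          simp only [bStep, b_inner, List.nil_append, level_step]]
      rw [ih (k+1)]
      simp only [List.length_cons, layers, update_append]
      rw [show k + 1 + t.length = k + (t.length + 1) from by omega]

-- dropping a duplicated head under Set.update-from-empty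
lemma update_cons_dup (x : List Char) (l : List (List Char)) :
    PySem.Set.update ([] : PySem.Set (List Char)) (x :: x :: l)
      = PySem.Set.update ([] : PySem.Set (List Char)) (x :: l) := by
  show (x :: x :: l).foldl PySem.Set.add [] = (x :: l).foldl PySem.Set.add []
  simp only [List.foldl_cons, add_add_self]

-- ===== VERDICT (by name: the statement is the Claim_ definition above) =====
set_option maxRecDepth 10000 in
set_option maxHeartbeats 1600000 in
theorem mset_spec : Claim_equal_mset := by
  intro s _
  simp only [Spec_mset, mset, mset_alt]
  set sl := s.toList
  have hr10 : PySem.List.pyRange 0 10 1 = [0,1,2,3,4,5,6,7,8,9] := by decide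
  have hr9 : PySem.List.pyRange 0 9 1 = [0,1,2,3,4,5,6,7,8] := by decide
  -- B side
  have hb : (PySem.List.pyRange 0 9 1).foldl (bStep sl) (PySem.Set.empty, [[]])
      = (PySem.Set.update ([] : PySem.Set (List Char)) (layers sl 0 9),
         (allBin 9).filter (fun q => PySem.Chars.isIn q sl)) := by
    have h0 : ([[]] : List (List Char)) = (allBin 0).filter (fun q => PySem.Chars.isIn q sl) := by
      simp [allBin, PySem.Chars.isIn_nil]
    rw [h0, b_loop sl (PySem.List.pyRange 0 9 1) 0 PySem.Set.empty, hr9]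
    rfl
  rw [hb]
  -- A side
  rw [hr10]
  simp only [List.foldl_cons, List.foldl_nil, aInner_fold]
  rw [cand0, cand_eq1, cand_eq2, cand_eq3, cand_eq4, cand_eq5, cand_eq6, cand_eq7,
    cand_eq8, cand_eq9]
  rw [show (PySem.Set.empty : PySem.Set (List Char)) = [] from rfl]
  rw [← update_append, ← update_append, ← update_append, ← update_append, ← update_append,
    ← update_append, ← update_append, ← update_append, ← update_append]
  congr 1
  -- remaining: the two filtered concatenations build the same set list
  have hlayers : layers sl 0 9
      = ((allBin 1).filter (fun q => PySem.Chars.isIn q sl)) ++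
        (((allBin 2).filter (fun q => PySem.Chars.isIn q sl)) ++
        (((allBin 3).filter (fun q => PySem.Chars.isIn q sl)) ++
        (((allBin 4).filter (fun q => PySem.Chars.isIn q sl)) ++
        (((allBin 5).filter (fun q => PySem.Chars.isIn q sl)) ++
        (((allBin 6).filter (fun q => PySem.Chars.isIn q sl)) ++
        (((allBin 7).filter (fun q => PySem.Chars.isIn q sl)) ++
        (((allBin 8).filter (fun q => PySem.Chars.isIn q sl)) ++
        ((allBin 9).filter (fun q => PySem.Chars.isIn q sl))))))))) := by
    simp only [layers]
    norm_num
  rw [hlayers]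
  by_cases h0 : PySem.Chars.isIn ['0'] sl
  · rw [show ([['0']] : List (List Char)).filter (fun q => PySem.Chars.isIn q sl) = [['0']] by
      simp [h0]]
    rw [show (allBin 1).filter (fun q => PySem.Chars.isIn q sl)
        = ['0'] :: ([['1']] : List (List Char)).filter (fun q => PySem.Chars.isIn q sl) by
      simp [allBin, List.filter_cons, h0]]
    rw [List.singleton_append, List.cons_append]
    exact update_cons_dup _ _
  · rw [show ([['0']] : List (List Char)).filter (fun q => PySem.Chars.isIn q sl) = [] by
      simp [eq_false_of_ne_true h0]]
    rw [List.nil_append]
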